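-- pv_equiv track=rewrite | github.com/ivyshaft/mycode | Python/os_counts.py | os_counts
-- ===== SOURCE A (Python) =====
-- def os_counts(os_dict):
--     os_list = list(os_dict.values())
--     os_set = set(os_list)
--     os_keys = list(os_set)
--     os_keys.sort(reverse=True)
--     output_dict = {}
--     for os in os_keys:
--         os_count = os_list.count(os)
--         output_dict[os] = os_count
--     return output_dict
-- ===== SOURCE B (Python) =====
-- def os_counts(os_dict):
--     vals = sorted(os_dict.values(), reverse=True)
--     out = {}
--     while vals:
--         v = vals[0]
--         run = 1
--         while run < len(vals) and vals[run] == v: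
--             run += 1
--         out[v] = run
--         vals = vals[run:]
--     return out
-- ===== Notes on version B (the rewrite author's own statement) =====
-- stated objective: faster
-- what changed: Sorts the whole value list descending once and makes a single grouping pass over it, emitting each run's value with its run length, instead of A's set-of-keys plus a per-key list.count rescan of the value list.
import Mathlib
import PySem

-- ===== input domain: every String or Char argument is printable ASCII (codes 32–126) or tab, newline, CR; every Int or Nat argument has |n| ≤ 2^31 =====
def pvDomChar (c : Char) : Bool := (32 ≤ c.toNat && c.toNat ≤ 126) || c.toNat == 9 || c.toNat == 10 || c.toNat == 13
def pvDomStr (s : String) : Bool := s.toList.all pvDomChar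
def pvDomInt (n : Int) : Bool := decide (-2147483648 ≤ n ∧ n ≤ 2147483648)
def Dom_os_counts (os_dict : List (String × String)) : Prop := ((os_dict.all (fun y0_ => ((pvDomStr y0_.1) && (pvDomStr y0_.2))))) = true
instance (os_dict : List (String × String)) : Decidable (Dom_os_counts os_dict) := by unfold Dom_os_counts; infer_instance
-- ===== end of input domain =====

-- B sorts the whole value list descending once and makes a single grouping pass over runs,
-- replacing A's set-of-keys + per-key list.count rescans (objective: faster, measured).


-- ===== PORT A =====
def os_counts (os_dict : List (String × String)) : List (String × Int) :=
  let osList := PySem.Dict.values (PySem.Dict.ofList os_dict)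
  let osSet : PySem.Set String := PySem.Set.ofList osList
  let osKeys := PySem.List.sorted osSet (fun x => x) true
  let outputDict := osKeys.foldl
    (fun d os => d.insert os ((PySem.List.count osList os : Nat) : Int))
    PySem.Dict.empty
  outputDict.items

-- ===== PORT B =====
-- B's outer 'while vals' loop: record the head value with its run length
-- (1 + the leading stretch of equal values), then continue after the run.
def pvGroupRuns : List String → List (String × Int)
  | [] => []
  | v :: rest =>
      (v, 1 + ((rest.takeWhile (fun x => x == v)).length : Int)) ::
        pvGroupRuns (rest.dropWhile (fun x => x == v))
  termination_by l => l.length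
  decreasing_by
    simpa [List.length_cons] using Nat.lt_succ_of_le (List.length_dropWhile_le _ rest)

def os_counts_alt (os_dict : List (String × String)) : List (String × Int) :=
  let vals := PySem.List.sorted (PySem.Dict.values (PySem.Dict.ofList os_dict)) (fun x => x) true
  ((pvGroupRuns vals).foldl (fun d p => d.insert p.1 p.2) PySem.Dict.empty).items

-- ===== PRECONDITION & SPEC =====
def Spec_os_counts (os_dict : List (String × String)) (out : List (String × Int)) : Prop := out = os_counts_alt os_dict
instance (os_dict : List (String × String)) (out : List (String × Int)) : Decidable (Spec_os_counts os_dict out) := by unfold Spec_os_counts; infer_instance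

-- ===== CLAIM =====
def Claim_equal_os_counts : Prop := ∀ (os_dict : List (String × String)), Dom_os_counts os_dict → Spec_os_counts os_dict (os_counts os_dict)

-- ===== LEMMAS AND PROOFS =====

-- keys emitted by the grouping pass
def pvKeys (s : List String) : List String := (pvGroupRuns s).map Prod.fst

theorem pvGroupRuns_cons (v : String) (rest : List String) :
    pvGroupRuns (v :: rest) =
      (v, 1 + ((rest.takeWhile (fun x => x == v)).length : Int)) ::
        pvGroupRuns (rest.dropWhile (fun x => x == v)) := by
  rw [pvGroupRuns]

-- in a descending list, everything after the leading run of v is strictly below v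
theorem pv_dropWhile_lt {v : String} {rest : List String}
    (hp : rest.Pairwise (fun a b => b ≤ a)) (hle : ∀ x ∈ rest, x ≤ v) :
    ∀ x ∈ rest.dropWhile (fun x => x == v), x < v := by
  intro x hx
  cases hdw : rest.dropWhile (fun x => x == v) with
  | nil => simp [hdw] at hx
  | cons h t =>
    have hsub : (rest.dropWhile (fun x => x == v)).Sublist rest := List.dropWhile_sublist _
    have hne : ¬ rest.dropWhile (fun x => x == v) = [] := by simp [hdw]
    have hhead : ((rest.dropWhile (fun x => x == v)).head hne == v) = false :=
      List.head_dropWhile_not _ hne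
    have hhv : h < v := by
      have hhle : h ≤ v := hle h (hsub.mem (by simp [hdw]))
      have : h ≠ v := by
        intro h'
        simp [hdw, h'] at hhead
      exact lt_of_le_of_ne hhle this
    have hpd : (rest.dropWhile (fun x => x == v)).Pairwise (fun a b => b ≤ a) :=
      hp.sublist hsub
    rw [hdw] at hpd hx
    rcases List.mem_cons.mp hx with rfl | hxt
    · exact hhv
    · exact lt_of_le_of_lt ((List.pairwise_cons.mp hpd).1 x hxt) hhv

theorem pv_mem_keys (s : List String) (x : String) : x ∈ pvKeys s ↔ x ∈ s := by
  induction s using pvGroupRuns.induct with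
  | case1 => simp [pvKeys, pvGroupRuns]
  | case2 v rest ih =>
    unfold pvKeys
    rw [pvGroupRuns_cons]
    simp only [List.map_cons, List.mem_cons]
    constructor
    · rintro (rfl | hx)
      · exact Or.inl rfl
      · exact Or.inr ((List.dropWhile_sublist _).mem (ih.mp hx))
    · rintro (rfl | hx)
      · exact Or.inl rfl
      · conv at hx => rw [← List.takeWhile_append_dropWhile (p := fun y => y == v) (l := rest)]
        rcases List.mem_append.mp hx with hx | hx
        · exact Or.inl (by simpa using List.mem_takeWhile_imp hx)
        · exact Or.inr (ih.mpr hx)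

theorem pv_keys_pairwise_gt {s : List String} (hp : s.Pairwise (fun a b => b ≤ a)) :
    (pvKeys s).Pairwise (fun a b => b < a) := by
  induction s using pvGroupRuns.induct with
  | case1 => simp [pvKeys, pvGroupRuns]
  | case2 v rest ih =>
    rcases List.pairwise_cons.mp hp with ⟨hle, hprest⟩
    have hpd : (rest.dropWhile (fun x => x == v)).Pairwise (fun a b => b ≤ a) :=
      hprest.sublist (List.dropWhile_sublist _)
    unfold pvKeys
    rw [pvGroupRuns_cons]
    simp only [List.map_cons]
    refine List.pairwise_cons.mpr ⟨?_, ih hpd⟩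
    intro k hk
    exact pv_dropWhile_lt hprest hle k ((pv_mem_keys _ k).mp hk)

theorem pv_runs_eq {s : List String} (hp : s.Pairwise (fun a b => b ≤ a)) :
    pvGroupRuns s = (pvKeys s).map (fun k => (k, ((List.count k s : Nat) : Int))) := by
  induction s using pvGroupRuns.induct with
  | case1 => simp [pvKeys, pvGroupRuns]
  | case2 v rest ih =>
    rcases List.pairwise_cons.mp hp with ⟨hle, hprest⟩
    have hpd : (rest.dropWhile (fun x => x == v)).Pairwise (fun a b => b ≤ a) :=
      hprest.sublist (List.dropWhile_sublist _)
    have hlt := pv_dropWhile_lt hprest hle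
    have hsplit : rest.takeWhile (fun x => x == v) ++ rest.dropWhile (fun x => x == v) = rest :=
      List.takeWhile_append_dropWhile
    have hkeys_cons : pvKeys (v :: rest) = v :: pvKeys (rest.dropWhile (fun x => x == v)) := by
      unfold pvKeys; rw [pvGroupRuns_cons]; simp
    rw [pvGroupRuns_cons, hkeys_cons, List.map_cons]
    simp only [List.cons.injEq, Prod.mk.injEq]
    refine ⟨⟨trivial, ?_⟩, ?_⟩
    · -- head: run length = count of v in s
      have htw : List.count v (rest.takeWhile (fun x => x == v)) =
          (rest.takeWhile (fun x => x == v)).length :=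
        List.count_eq_length.mpr (fun b hb => by
          have hbv : b = v := by simpa using List.mem_takeWhile_imp hb
          exact hbv.symm)
      have hdw : List.count v (rest.dropWhile (fun x => x == v)) = 0 :=
        List.count_eq_zero.mpr (fun hmem => lt_irrefl v (hlt v hmem))
      have hcount : List.count v (v :: rest) = (rest.takeWhile (fun x => x == v)).length + 1 := by
        rw [List.count_cons_self]
        conv_lhs => rw [← hsplit]
        rw [List.count_append, htw, hdw]
      rw [hcount]
      push_cast
      ring
    · -- tail: counts in the remainder equal counts in s
      rw [ih hpd]
      apply List.map_congr_left
      intro k hk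
      have hkmem : k ∈ rest.dropWhile (fun x => x == v) := (pv_mem_keys _ k).mp hk
      have hkv : k ≠ v := ne_of_lt (hlt k hkmem)
      have htw : List.count k (rest.takeWhile (fun x => x == v)) = 0 :=
        List.count_eq_zero.mpr (fun hmem => hkv (by simpa using List.mem_takeWhile_imp hmem))
      have hc : List.count k (v :: rest) = List.count k (rest.dropWhile (fun x => x == v)) := by
        rw [List.count_cons_of_ne (Ne.symm hkv)]
        conv_lhs => rw [← hsplit]
        rw [List.count_append, htw]
        omega
      rw [hc]

-- Both ports reduce to the same canonical form: descending-sorted distinct values, each with its count.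
theorem os_counts_eq_canon (os_dict : List (String × String)) :
    os_counts os_dict =
      (PySem.List.sorted (PySem.Set.ofList (PySem.Dict.values (PySem.Dict.ofList os_dict))) (fun x => x) true).map
        (fun k => (k, (PySem.List.count (PySem.Dict.values (PySem.Dict.ofList os_dict)) k : Int))) := by
  unfold os_counts
  set l := PySem.Dict.values (PySem.Dict.ofList os_dict) with hl
  have hnd : (PySem.List.sorted (PySem.Set.ofList l) (fun x => x) true).Nodup :=
    (PySem.List.sorted_perm _ _ _).nodup_iff.mpr (PySem.Set.nodup_ofList l)
  have := PySem.Dict.items_foldl_insert_fresh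
    (l := PySem.List.sorted (PySem.Set.ofList l) (fun x => x) true)
    (k := fun x => x)
    (v := fun k => ((PySem.List.count l k : Nat) : Int))
    (d := PySem.Dict.empty)
    (by intro a _; simp [PySem.Dict.contains_empty]) (by simpa using hnd)
  simpa using this

theorem os_counts_alt_eq_canon (os_dict : List (String × String)) :
    os_counts_alt os_dict =
      (PySem.List.sorted (PySem.Set.ofList (PySem.Dict.values (PySem.Dict.ofList os_dict))) (fun x => x) true).map
        (fun k => (k, (PySem.List.count (PySem.Dict.values (PySem.Dict.ofList os_dict)) k : Int))) := by
  set l := PySem.Dict.values (PySem.Dict.ofList os_dict) with hl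
  set s := PySem.List.sorted l (fun x => x) true with hs
  have h0 : os_counts_alt os_dict =
      ((pvGroupRuns s).foldl (fun d p => d.insert p.1 p.2) PySem.Dict.empty).items := rfl
  rw [h0]
  have hp : s.Pairwise (fun a b => b ≤ a) := PySem.List.sorted_pairwise_rev l (fun x => x)
  have hkgt : (pvKeys s).Pairwise (fun a b => b < a) := pv_keys_pairwise_gt hp
  have hknd : (pvKeys s).Nodup := hkgt.imp (fun h => ne_of_gt h)
  -- the emitted keys are exactly sorted(set(l), reverse=True)
  have hperm : (pvKeys s).Perm (PySem.Set.ofList l) := by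
    rw [List.perm_ext_iff_of_nodup hknd (PySem.Set.nodup_ofList l)]
    intro a
    rw [pv_mem_keys, PySem.Set.mem_ofList]
    exact (PySem.List.mem_sorted l (fun x => x) true a)
  have hkeys : PySem.List.sorted (PySem.Set.ofList l) (fun x => x) true = pvKeys s :=
    PySem.List.sorted_rev_eq_of_perm_of_pairwise_gt _ _ _ hperm hkgt
  -- the dict built from the runs lists exactly the runs
  rw [pv_runs_eq hp, List.foldl_map]
  have := PySem.Dict.items_foldl_insert_fresh
    (l := pvKeys s)
    (k := fun x => x)
    (v := fun k => ((List.count k s : Nat) : Int))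
    (d := PySem.Dict.empty)
    (by intro a _; simp [PySem.Dict.contains_empty]) (by simpa using hknd)
  simp only [] at this ⊢
  rw [this]
  rw [hkeys]
  simp only [PySem.Dict.empty, List.nil_append]
  apply List.map_congr_left
  intro k _
  have hcnt : List.count k s = List.count k l := (PySem.List.sorted_perm l (fun x => x) true).count_eq k
  rw [PySem.List.count_eq, ← hcnt]

-- ===== VERDICT =====
theorem os_counts_spec : Claim_equal_os_counts := by
  intro os_dict _
  unfold Spec_os_counts
  rw [os_counts_eq_canon, os_counts_alt_eq_canon]
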